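-- pv_equiv track=rewrite | github.com/tdktrang/multi-objective-production-planning | Phase 1 Multi Objective Runtime Planning.py | generate_scenario
-- ===== SOURCE A (Python) =====
-- from itertools import combinations
--
-- def generate_scenario(list_):
--     list_1 = []
--     for i in list_:
--       list_1.append(list(range(i+1)))
--     list_2 = []
--     for j in list_1:
--       for j_ in j:
--         list_2.append(j_)
--     list_3 = list(combinations(list_2,len(list_)))
--     #seperate scenario
--     over_load = []
--     for i in range(len(list_3)):
--       for j in range(len(list_3[i])):
--         if list_3[i][j] > list_[j]:
--           over_load.append(list_3[i])
--     #create tuple full 0 number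
--     temp = []
--     for i in range(len(list_)):
--       temp.append(0)
--     temp = tuple(temp)
--     #create scenario number of machine
--     scenario_machine = []
--     for i in list_3:
--       if i not in over_load and i != temp and i not in scenario_machine:
--         scenario_machine.append(i)
--     return scenario_machine
-- ===== SOURCE B (Python) =====
-- def generate_scenario(list_):
--     pool = [v for cap in list_ for v in range(cap + 1)]
--     n = len(list_)
--     out = []
--
--     def rec(start, prefix):
--         if len(prefix) == n:
--             if all(v <= c for v, c in zip(prefix, list_)) and any(prefix):
--                 out.append(tuple(prefix))
--             return
--         seen = set()
--         for i in range(start, len(pool)):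
--             if pool[i] not in seen:
--                 seen.add(pool[i])
--                 rec(i + 1, prefix + [pool[i]])
--
--     rec(0, [])
--     return out
-- ===== Notes on version B (the rewrite author's own statement) =====
-- stated objective: faster
-- what changed: A materialises all C(L,n) combinations of the flattened pool and filters them with quadratic list-membership scans; B backtracks over the pool generating each distinct combination exactly once (skipping repeated values per level), checking the cap/non-zero condition at the leaves, which yields the same tuples in the same first-occurrence order.
import Mathlib
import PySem

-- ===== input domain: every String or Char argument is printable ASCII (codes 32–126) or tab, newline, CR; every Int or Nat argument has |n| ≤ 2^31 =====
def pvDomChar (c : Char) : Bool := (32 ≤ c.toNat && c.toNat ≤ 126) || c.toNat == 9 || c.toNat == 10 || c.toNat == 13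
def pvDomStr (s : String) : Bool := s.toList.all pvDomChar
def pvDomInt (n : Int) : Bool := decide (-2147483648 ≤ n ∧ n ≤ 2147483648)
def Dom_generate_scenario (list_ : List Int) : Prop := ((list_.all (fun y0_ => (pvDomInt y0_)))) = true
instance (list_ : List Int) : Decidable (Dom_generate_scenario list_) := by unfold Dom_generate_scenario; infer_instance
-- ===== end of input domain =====

-- B replaces A's enumeration of all C(L,n) combinations of the flattened pool (followed by three
-- filtering passes with list-membership scans) by a backtracking search that emits each distinct
-- combination exactly once, in the same first-occurrence order; objective: faster.

-- ===== PORT A =====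
-- 'itertools.combinations' is PySem.List.combinations (CPython's index-lexicographic order).
def generate_scenario (list_ : List Int) : List (List Int) :=
  let list_1 : List (List Int) := list_.foldl (fun acc i => acc ++ [PySem.List.pyRange 0 (i+1) 1]) []
  let list_2 : List Int := list_1.foldl (fun acc j => j.foldl (fun a j_ => a ++ [j_]) acc) []
  let list_3 : List (List Int) := PySem.List.combinations list_2 list_.length
  let over_load : List (List Int) :=
    (PySem.List.pyRange 0 (list_3.length : Int) 1).foldl (fun ov i =>
      (PySem.List.pyRange 0 ((PySem.List.pyGetD list_3 i []).length : Int) 1).foldl (fun ov2 j =>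
        if PySem.List.pyGetD (PySem.List.pyGetD list_3 i []) j 0 > PySem.List.pyGetD list_ j 0 then
          ov2 ++ [PySem.List.pyGetD list_3 i []]
        else ov2) ov) []
  let temp : List Int := (PySem.List.pyRange 0 (list_.length : Int) 1).foldl (fun t _ => t ++ [(0:Int)]) []
  list_3.foldl (fun sm i => if i ∉ over_load ∧ i ≠ temp ∧ i ∉ sm then sm ++ [i] else sm) []

-- ===== PORT B =====
-- pvRec is Source B's 'rec', pvScan its 'for i in range(start, len(pool))' loop: the loop reads
-- pool[start:], so the port walks that suffix ('rest') directly, with the same 'seen' set.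
mutual
def pvRec (list_ : List Int) (n : Nat) (pfx : List Int) (rest : List Int) : List (List Int) :=
  if pfx.length = n then
    if (pfx.zip list_).all (fun vc => vc.1 ≤ vc.2) && pfx.any (fun v => v != 0) then [pfx] else []
  else
    pvScan list_ n pfx rest PySem.Set.empty
termination_by 2*(n - pfx.length) + 2*rest.length + 1
decreasing_by omega

def pvScan (list_ : List Int) (n : Nat) (pfx : List Int) (rest : List Int) (seen : PySem.Set Int) : List (List Int) :=
  match rest with
  | [] => []
  | x :: xs =>
    if PySem.Set.contains seen x then pvScan list_ n pfx xs seen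
    else pvRec list_ n (pfx ++ [x]) xs ++ pvScan list_ n pfx xs (PySem.Set.add seen x)
termination_by 2*(n - pfx.length) + 2*rest.length
decreasing_by all_goals (simp only [List.length_cons, List.length_append, List.length_nil]; omega)
end

def generate_scenario_alt (list_ : List Int) : List (List Int) :=
  let pool : List Int := list_.flatMap (fun cap => PySem.List.pyRange 0 (cap+1) 1)
  let n := list_.length
  pvRec list_ n [] pool

-- ===== PRECONDITION & SPEC =====
def Spec_generate_scenario (list_ : List Int) (out : List (List Int)) : Prop := out = generate_scenario_alt list_
instance (list_ : List Int) (out : List (List Int)) : Decidable (Spec_generate_scenario list_ out) := by unfold Spec_generate_scenario; infer_instance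

-- ===== CLAIM (what is proved, stated in full; the proofs are below) =====
def Claim_equal_generate_scenario : Prop := ∀ (list_ : List Int), Dom_generate_scenario list_ → Spec_generate_scenario list_ (generate_scenario list_)

-- ===== LEMMAS AND PROOFS =====

-- the leaf test of Source B's 'rec': within the per-index caps and not all-zero
def pvKeep (list_ : List Int) (t : List Int) : Bool :=
  (t.zip list_).all (fun vc => vc.1 ≤ vc.2) && t.any (fun v => v != 0)

-- keep the FIRST occurrence of every value (the order A's final dedup loop produces)
def pvDedup {α : Type} [DecidableEq α] : List α → List α
  | [] => []
  | x :: xs => x :: pvDedup (xs.filter (fun y => y ≠ x))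
termination_by l => l.length
decreasing_by
  simp only [List.length_unattach]
  exact Nat.lt_succ_of_le (le_trans (List.length_filter_le _ _) (by simp))

-- the distinct combinations of the pool, each exactly once, in first-occurrence order
def pvDC : List Int → Nat → List (List Int)
  | _, 0 => [[]]
  | [], _+1 => []
  | x :: xs, k+1 =>
      (pvDC xs k).map (fun t => x :: t) ++ (pvDC xs (k+1)).filter (fun t => t.head? ≠ some x)

theorem pvDedup_cons {α : Type} [DecidableEq α] (x : α) (l : List α) :
    pvDedup (x :: l) = x :: pvDedup (l.filter (fun y => y ≠ x)) := by rw [pvDedup]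

theorem mem_pvDedup {α : Type} [DecidableEq α] : ∀ (l : List α) (a : α), a ∈ pvDedup l ↔ a ∈ l
  | [], a => by rw [pvDedup]
  | x :: xs, a => by
    rw [pvDedup_cons]
    by_cases hax : a = x
    · simp [hax]
    · simp only [List.mem_cons, mem_pvDedup (xs.filter (fun y => y ≠ x)) a, List.mem_filter]
      simp [hax]
termination_by l _ => l.length
decreasing_by
  exact Nat.lt_succ_of_le (List.length_filter_le _ _)

theorem pvDedup_filter {α : Type} [DecidableEq α] (q : α → Bool) :
    ∀ (l : List α), pvDedup (l.filter q) = (pvDedup l).filter q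
  | [] => by simp [pvDedup]
  | x :: xs => by
    by_cases hq : q x
    · rw [List.filter_cons_of_pos hq, pvDedup_cons, pvDedup_cons, List.filter_cons_of_pos hq]
      have hcomm : (xs.filter q).filter (fun y => y ≠ x) = (xs.filter (fun y => y ≠ x)).filter q := by
        rw [List.filter_filter, List.filter_filter]
        exact List.filter_congr (fun a _ => Bool.and_comm _ _)
      rw [hcomm, pvDedup_filter q (xs.filter (fun y => y ≠ x))]
    · rw [List.filter_cons_of_neg hq, pvDedup_cons, List.filter_cons_of_neg hq]
      rw [← pvDedup_filter q (xs.filter (fun y => y ≠ x))]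
      have h1 : (xs.filter (fun y => y ≠ x)).filter q = xs.filter q := by
        rw [List.filter_filter]
        refine List.filter_congr (fun a _ => ?_)
        have hne : q a = true → a ≠ x := fun hqa hax => hq (hax ▸ hqa)
        cases hqa : q a
        · simp
        · simp [hne hqa]
      rw [h1]
termination_by l => l.length
decreasing_by
  all_goals exact Nat.lt_succ_of_le (List.length_filter_le _ _)

theorem pvDedup_append {α : Type} [DecidableEq α] :
    ∀ (l1 l2 : List α), pvDedup (l1 ++ l2) = pvDedup l1 ++ (pvDedup l2).filter (fun a => a ∉ l1)
  | [], l2 => by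
    rw [List.nil_append, pvDedup]
    rw [List.filter_congr (q := fun _ => true) (fun a _ => by simp)]
    rw [List.filter_true, List.nil_append]
  | x :: l1, l2 => by
    rw [List.cons_append, pvDedup_cons, pvDedup_cons, List.filter_append]
    rw [pvDedup_append (l1.filter (fun y => y ≠ x)) (l2.filter (fun y => y ≠ x))]
    rw [pvDedup_filter (fun y => y ≠ x) l2]
    rw [List.cons_append]
    congr 2
    rw [List.filter_filter]
    apply List.filter_congr
    intro a _
    by_cases hax : a = x
    · subst hax; simp
    · by_cases hal : a ∈ l1 <;> simp [hax, hal, List.mem_filter]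
termination_by l1 _ => l1.length
decreasing_by
  exact Nat.lt_succ_of_le (List.length_filter_le _ _)

theorem pvDedup_map_cons (x : Int) :
    ∀ (l : List (List Int)), pvDedup (l.map (fun t => x :: t)) = (pvDedup l).map (fun t => x :: t)
  | [] => by simp [pvDedup]
  | t :: ts => by
    rw [List.map_cons, pvDedup_cons, pvDedup_cons, List.map_cons]
    congr 1
    rw [List.filter_map]
    rw [List.filter_congr (p := (fun y => y ≠ x :: t) ∘ (fun u => x :: u)) (q := fun y => y ≠ t)
      (fun a _ => by simp [Function.comp, decide_eq_decide])]
    rw [pvDedup_map_cons x (ts.filter (fun y => y ≠ t))]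
termination_by l => l.length
decreasing_by
  exact Nat.lt_succ_of_le (List.length_filter_le _ _)

theorem length_mem_pvDC : ∀ (xs : List Int) (k : Nat) (t : List Int), t ∈ pvDC xs k → t.length = k
  | xs, 0, t => by intro h; simp only [pvDC, List.mem_singleton] at h; simp [h]
  | [], _+1, t => by intro h; simp [pvDC] at h
  | x :: xs, k+1, t => by
    intro h
    simp only [pvDC] at h
    rcases List.mem_append.mp h with h1 | h2
    · obtain ⟨r, hr, rfl⟩ := List.mem_map.mp h1
      simp [length_mem_pvDC xs k r hr]
    · exact length_mem_pvDC xs (k+1) t (List.mem_filter.mp h2).1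

theorem pvDedup_comb : ∀ (xs : List Int) (k : Nat),
    pvDedup (PySem.List.combinations xs k) = pvDC xs k
  | xs, 0 => by
    rw [PySem.List.combinations_zero]
    simp [pvDedup, pvDC]
  | [], k+1 => by
    rw [PySem.List.combinations_nil_succ]
    simp [pvDedup, pvDC]
  | x :: xs, k+1 => by
    rw [PySem.List.combinations_cons_succ, pvDedup_append, pvDedup_map_cons x,
        pvDedup_comb xs k, pvDedup_comb xs (k+1)]
    simp only [pvDC]
    congr 1
    apply List.filter_congr
    intro t ht
    have hlen : t.length = k+1 := length_mem_pvDC xs (k+1) t ht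
    have htc : t ∈ PySem.List.combinations xs (k+1) := by
      rw [← pvDedup_comb xs (k+1)] at ht
      exact (mem_pvDedup _ t).mp ht
    obtain ⟨hsub, -⟩ := (PySem.List.mem_combinations_iff xs (k+1) t).mp htc
    cases t with
    | nil => simp at hlen
    | cons h r =>
      rw [decide_eq_decide]
      have hmem : (h :: r ∈ (PySem.List.combinations xs k).map (fun u => x :: u)) ↔ h = x := by
        constructor
        · intro hm
          obtain ⟨r', -, heq⟩ := List.mem_map.mp hm
          exact (List.cons.injEq x r' h r ▸ heq).1.symm
        · intro hx
          subst hx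
          refine List.mem_map.mpr ⟨r, ?_, rfl⟩
          exact (PySem.List.mem_combinations_iff xs k r).mpr
            ⟨List.sublist_of_cons_sublist hsub, by simpa using hlen⟩
      rw [hmem]
      simp

theorem pvFold_dedup (ov : List (List Int)) (tmp : List Int) :
    ∀ (l acc : List (List Int)),
      l.foldl (fun sm i => if i ∉ ov ∧ i ≠ tmp ∧ i ∉ sm then sm ++ [i] else sm) acc
        = acc ++ pvDedup ((l.filter (fun i => decide (i ∉ ov ∧ i ≠ tmp))).filter (fun i => decide (i ∉ acc)))
  | [], acc => by simp [pvDedup]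
  | x :: l, acc => by
    rw [List.foldl_cons]
    by_cases h1 : x ∉ ov ∧ x ≠ tmp
    · by_cases h2 : x ∉ acc
      · rw [if_pos ⟨h1.1, h1.2, h2⟩, pvFold_dedup ov tmp l (acc ++ [x])]
        rw [List.filter_cons_of_pos (by simpa using h1), List.filter_cons_of_pos (by simpa using h2),
            pvDedup_cons, List.append_assoc, List.singleton_append]
        congr 2
        rw [List.filter_filter, List.filter_filter, List.filter_filter]
        exact congrArg pvDedup (List.filter_congr (fun a _ => by
          by_cases hax : a = x <;> by_cases hacc2 : a ∈ acc <;>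
            by_cases hP : a ∉ ov ∧ a ≠ tmp <;> simp [hax, hacc2, hP]))
      · rw [if_neg (by tauto), pvFold_dedup ov tmp l acc,
            List.filter_cons_of_pos (by simpa using h1),
            List.filter_cons_of_neg (by simpa using h2)]
    · rw [if_neg (by tauto), pvFold_dedup ov tmp l acc,
          List.filter_cons_of_neg (by simpa using h1)]

mutual
theorem pvRec_spec (caps : List Int) (n : Nat) (pfx rest : List Int) (h : pfx.length ≤ n) :
    pvRec caps n pfx rest
      = ((pvDC rest (n - pfx.length)).map (fun t => pfx ++ t)).filter (pvKeep caps) := by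
  rw [pvRec]
  by_cases hlen : pfx.length = n
  · rw [if_pos hlen]
    have h0 : n - pfx.length = 0 := by omega
    rw [h0]
    simp only [pvDC, List.map_cons, List.map_nil, List.append_nil, List.filter, pvKeep]
    split
    · next hcnd => simp [hcnd]
    · next hcnd => rw [Bool.not_eq_true] at hcnd; simp [hcnd]
  · rw [if_neg hlen]
    rw [pvScan_spec caps n pfx rest PySem.Set.empty (lt_of_le_of_ne h hlen)]
    congr 2
    rw [List.filter_congr (p := fun (t : List Int) => !(PySem.Set.contains PySem.Set.empty t.headI))
        (q := fun _ => true) (fun t _ => rfl), List.filter_true]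
termination_by 2*(n - pfx.length) + 2*rest.length + 1
decreasing_by omega

theorem pvScan_spec (caps : List Int) (n : Nat) (pfx rest : List Int) (seen : PySem.Set Int)
    (h : pfx.length < n) :
    pvScan caps n pfx rest seen
      = (((pvDC rest (n - pfx.length)).filter (fun t => !(PySem.Set.contains seen t.headI))).map
          (fun t => pfx ++ t)).filter (pvKeep caps) := by
  obtain ⟨k, hk⟩ : ∃ k, n - pfx.length = k + 1 := ⟨n - pfx.length - 1, by omega⟩
  cases rest with
  | nil =>
    rw [pvScan, hk]
    simp [pvDC]
  | cons x xs =>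
    rw [pvScan, hk]
    simp only [pvDC]
    by_cases hc : PySem.Set.contains seen x = true
    · rw [if_pos hc, pvScan_spec caps n pfx xs seen h, hk]
      congr 2
      rw [List.filter_append, List.filter_map]
      have hp1 : ((pvDC xs k).filter ((fun t => !(PySem.Set.contains seen t.headI)) ∘ (fun t => x :: t))) = [] := by
        rw [List.filter_congr (q := fun _ => false)
          (fun a _ => by simp [Function.comp]; exact (PySem.Set.contains_iff seen x).mp hc)]
        exact List.filter_false _
      rw [hp1, List.map_nil, List.nil_append, List.filter_filter]
      apply List.filter_congr
      intro t ht
      have hl := length_mem_pvDC xs (k+1) t ht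
      cases t with
      | nil => simp at hl
      | cons h' r =>
        by_cases hax : h' = x
        · subst hax
          simp only [List.headI]
          simp
          exact (PySem.Set.contains_iff seen h').mp hc
        · simp [hax]
    · rw [if_neg hc]
      have hcf : PySem.Set.contains seen x = false := by
        cases hcb : PySem.Set.contains seen x
        · rfl
        · exact absurd hcb hc
      rw [pvRec_spec caps n (pfx ++ [x]) xs
            (by simp only [List.length_append, List.length_cons, List.length_nil]; omega)]
      rw [pvScan_spec caps n pfx xs (PySem.Set.add seen x) h, hk]
      have harg : n - (pfx ++ [x]).length = k := by
        simp only [List.length_append, List.length_cons, List.length_nil]; omega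
      rw [harg]
      have hxs : x ∉ seen := fun hmem => by
        rw [(PySem.Set.contains_iff seen x).mpr hmem] at hcf
        cases hcf
      have hp1 : (List.map (fun t => x :: t) (pvDC xs k)).filter
            (fun t => !(PySem.Set.contains seen t.headI)) = List.map (fun t => x :: t) (pvDC xs k) := by
        rw [List.filter_map,
            List.filter_congr (q := fun _ => true) (fun a _ => by simp [Function.comp, hxs]),
            List.filter_true]
      have hpred2 : ((pvDC xs (k+1)).filter (fun t => t.head? ≠ some x)).filter
            (fun t => !(PySem.Set.contains seen t.headI))
          = (pvDC xs (k+1)).filter (fun t => !(PySem.Set.contains (PySem.Set.add seen x) t.headI)) := by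
        rw [List.filter_filter]
        apply List.filter_congr
        intro t ht
        have hl := length_mem_pvDC xs (k+1) t ht
        cases t with
        | nil => simp at hl
        | cons h' r =>
          by_cases hax : h' = x
          · subst hax
            have h1 : (PySem.Set.add seen h').contains h' = true :=
              (PySem.Set.contains_iff _ _).mpr ((PySem.Set.mem_add seen h' h').mpr (Or.inr rfl))
            simp [h1]
          · have h2 : (PySem.Set.add seen x).contains h' = seen.contains h' := by
              cases hcs : PySem.Set.contains seen h' with
              | true =>
                exact (PySem.Set.contains_iff _ _).mpr
                  ((PySem.Set.mem_add seen x h').mpr (Or.inl ((PySem.Set.contains_iff _ _).mp hcs)))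
              | false =>
                cases hca : PySem.Set.contains (PySem.Set.add seen x) h' with
                | false => rfl
                | true =>
                  rcases (PySem.Set.mem_add seen x h').mp ((PySem.Set.contains_iff _ _).mp hca) with hin | heq
                  · exact absurd ((PySem.Set.contains_iff _ _).mpr hin) (by rw [hcs]; simp)
                  · exact absurd heq hax
            simp [h2, hax]
      have hmapeq : (pvDC xs k).map ((fun t => pfx ++ t) ∘ (fun t => x :: t))
          = (pvDC xs k).map (fun t => (pfx ++ [x]) ++ t) :=
        List.map_congr_left (fun a _ => by simp [Function.comp])
      conv_rhs => rw [List.filter_append, hp1, hpred2,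
        List.map_append, List.filter_append, List.map_map, hmapeq]
termination_by 2*(n - pfx.length) + 2*rest.length
decreasing_by
  all_goals (simp only [List.length_cons, List.length_append, List.length_nil]; omega)
end

theorem alt_char (list_ : List Int) :
    generate_scenario_alt list_
      = (pvDC (list_.flatMap (fun cap => PySem.List.pyRange 0 (cap+1) 1)) list_.length).filter
          (pvKeep list_) := by
  unfold generate_scenario_alt
  rw [pvRec_spec list_ list_.length [] _ (by simp)]
  simp [pvKeep]

theorem mem_ov_iff (caps : List Int) (l3 : List (List Int)) (t : List Int) (ht : t ∈ l3) :
    (t ∈ l3.flatMap (fun u => ((PySem.List.pyRange 0 (u.length:Int) 1).filter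
        (fun j => decide (PySem.List.pyGetD u j 0 > PySem.List.pyGetD caps j 0))).map (fun _ => u)))
    ↔ ∃ j : Int, (0 ≤ j ∧ j < (t.length:Int)) ∧ PySem.List.pyGetD t j 0 > PySem.List.pyGetD caps j 0 := by
  rw [List.mem_flatMap]
  constructor
  · rintro ⟨u, hu, hmem⟩
    obtain ⟨j, hj, rfl⟩ := List.mem_map.mp hmem
    obtain ⟨hjr, hjp⟩ := List.mem_filter.mp hj
    obtain ⟨hj0, hjlt⟩ := PySem.List.mem_pyRange_one.mp hjr
    exact ⟨j, ⟨hj0, hjlt⟩, of_decide_eq_true hjp⟩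
  · rintro ⟨j, hjb, hjgt⟩
    refine ⟨t, ht, List.mem_map.mpr ⟨j, List.mem_filter.mpr ⟨?_, by simpa using hjgt⟩, rfl⟩⟩
    exact PySem.List.mem_pyRange_one.mpr ⟨hjb.1, hjb.2⟩

theorem le_iff (caps t : List Int) (hlen : t.length = caps.length) :
    (¬ ∃ j : Int, (0 ≤ j ∧ j < (t.length:Int)) ∧ PySem.List.pyGetD t j 0 > PySem.List.pyGetD caps j 0)
    ↔ ((t.zip caps).all (fun vc => vc.1 ≤ vc.2) = true) := by
  rw [List.all_eq_true]
  constructor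
  · intro hno x hx
    obtain ⟨i, hi, rfl⟩ := List.mem_iff_getElem.mp hx
    have hiz : i < t.length := by rw [List.length_zip] at hi; omega
    rw [List.getElem_zip, decide_eq_true_eq]
    by_contra hgt
    push_neg at hgt
    apply hno
    refine ⟨(i:Int), ⟨Int.natCast_nonneg i, by exact_mod_cast hiz⟩, ?_⟩
    rw [PySem.List.pyGetD_eq_getElem t 0 (Int.natCast_nonneg i) (by exact_mod_cast hiz),
        PySem.List.pyGetD_eq_getElem caps 0 (Int.natCast_nonneg i) (by exact_mod_cast hlen ▸ hiz)]
    simpa using hgt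
  · rintro hall ⟨j, ⟨hj0, hjlt⟩, hgt⟩
    have hjn : j.toNat < t.length := by omega
    rw [PySem.List.pyGetD_eq_getElem t 0 hj0 hjlt,
        PySem.List.pyGetD_eq_getElem caps 0 hj0 (by rw [← hlen]; exact hjlt)] at hgt
    have hmem : (t.zip caps)[j.toNat]'(by rw [List.length_zip]; omega) ∈ t.zip caps :=
      List.getElem_mem _
    have hle := hall _ hmem
    rw [List.getElem_zip, decide_eq_true_eq] at hle
    omega

theorem ne_rep_iff (t : List Int) (n : Nat) (hlen : t.length = n) :
    (t ≠ List.replicate n 0) ↔ (t.any (fun v => v != 0) = true) := by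
  constructor
  · intro hne
    by_contra hno
    rw [List.any_eq_true] at hno
    push_neg at hno
    exact hne (List.eq_replicate_iff.mpr ⟨hlen, fun b hb => by have := hno b hb; simpa using this⟩)
  · intro hany heq
    obtain ⟨x, hx, hxne⟩ := List.any_eq_true.mp hany
    rw [List.eq_replicate_iff] at heq
    exact (by simpa using hxne : x ≠ 0) (heq.2 x hx)

theorem a_char (list_ : List Int) :
    generate_scenario list_
      = pvDedup ((PySem.List.combinations (list_.flatMap (fun cap => PySem.List.pyRange 0 (cap+1) 1))
          list_.length).filter (pvKeep list_)) := by
  have h1 : list_.foldl (fun acc i => acc ++ [PySem.List.pyRange 0 (i+1) 1]) []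
      = list_.map (fun i => PySem.List.pyRange 0 (i+1) 1) := by
    simpa using PySem.List.foldl_append_singleton_eq_map (fun i : Int => PySem.List.pyRange 0 (i+1) 1) list_ []
  have h2 : (list_.map (fun i => PySem.List.pyRange 0 (i+1) 1)).foldl
        (fun acc j => j.foldl (fun a j_ => a ++ [j_]) acc) []
      = list_.flatMap (fun cap => PySem.List.pyRange 0 (cap+1) 1) := by
    rw [PySem.List.foldl_congr_mem' _ _ (fun acc j => acc ++ j) _
      (fun x _ acc => by simpa using PySem.List.foldl_append_singleton_eq_self x acc)]
    rw [PySem.List.foldl_append_eq_flatten, List.nil_append, List.flatMap_def]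
  have hov : (PySem.List.pyRange 0
        (((PySem.List.combinations (list_.flatMap (fun cap => PySem.List.pyRange 0 (cap+1) 1))
            list_.length).length : Int)) 1).foldl (fun ov i =>
        (PySem.List.pyRange 0 (((PySem.List.pyGetD (PySem.List.combinations
            (list_.flatMap (fun cap => PySem.List.pyRange 0 (cap+1) 1)) list_.length) i []).length : Int)) 1).foldl
          (fun ov2 j =>
            if PySem.List.pyGetD (PySem.List.pyGetD (PySem.List.combinations
                (list_.flatMap (fun cap => PySem.List.pyRange 0 (cap+1) 1)) list_.length) i []) j 0
                > PySem.List.pyGetD list_ j 0 then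
              ov2 ++ [PySem.List.pyGetD (PySem.List.combinations
                (list_.flatMap (fun cap => PySem.List.pyRange 0 (cap+1) 1)) list_.length) i []]
            else ov2) ov) []
      = (PySem.List.combinations (list_.flatMap (fun cap => PySem.List.pyRange 0 (cap+1) 1))
          list_.length).flatMap (fun t => List.map (fun _ => t) (List.filter
            (fun j => decide (PySem.List.pyGetD t j 0 > PySem.List.pyGetD list_ j 0))
            (PySem.List.pyRange 0 ((t.length : Int)) 1))) := by
    rw [PySem.List.foldl_pyRange_zero_pyGetD' _ []
      (fun ov t => (PySem.List.pyRange 0 ((t.length:Int)) 1).foldl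
        (fun ov2 j => if PySem.List.pyGetD t j 0 > PySem.List.pyGetD list_ j 0 then ov2 ++ [t] else ov2) ov) []]
    rw [PySem.List.foldl_congr_mem' _ _
      (fun ov t => ov ++ List.map (fun _ => t) (List.filter
        (fun j => decide (PySem.List.pyGetD t j 0 > PySem.List.pyGetD list_ j 0))
        (PySem.List.pyRange 0 ((t.length:Int)) 1))) []
      (fun t _ ov => PySem.List.foldl_append_ite
        (fun j => PySem.List.pyGetD t j 0 > PySem.List.pyGetD list_ j 0) (fun _ => t)
        (PySem.List.pyRange 0 ((t.length:Int)) 1) ov)]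
    rw [PySem.List.foldl_append_eq_flatMap, List.nil_append]
  have h4 : (PySem.List.pyRange 0 (list_.length:Int) 1).foldl (fun t _ => t ++ [(0:Int)]) []
      = List.replicate list_.length (0:Int) := by
    rw [PySem.List.foldl_append_singleton_eq_map (fun _ : Int => (0:Int))
        (PySem.List.pyRange 0 (list_.length:Int) 1), List.nil_append, List.map_const',
        PySem.List.length_pyRange_one]
    simp
  simp only [generate_scenario]
  rw [h1, h2, hov, h4]
  rw [pvFold_dedup, List.nil_append]
  rw [List.filter_congr (p := fun i => decide (i ∉ ([] : List (List Int)))) (q := fun _ => true)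
      (fun a _ => by simp), List.filter_true]
  congr 1
  apply List.filter_congr
  intro t ht
  have hlen : t.length = list_.length :=
    ((PySem.List.mem_combinations_iff _ list_.length t).mp ht).2
  rw [Bool.eq_iff_iff, decide_eq_true_eq]
  rw [mem_ov_iff list_ _ t ht]
  simp only [pvKeep, Bool.and_eq_true]
  constructor
  · rintro ⟨hno, hne⟩
    exact ⟨(le_iff list_ t hlen).mp hno, (ne_rep_iff t list_.length hlen).mp hne⟩
  · rintro ⟨hall, hany⟩
    exact ⟨(le_iff list_ t hlen).mpr hall, (ne_rep_iff t list_.length hlen).mpr hany⟩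

-- ===== VERDICT (by name: the statement is the Claim_ definition above) =====
theorem generate_scenario_spec : Claim_equal_generate_scenario := by
  intro list_ _
  unfold Spec_generate_scenario
  rw [a_char, alt_char, pvDedup_filter, pvDedup_comb]
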